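-- pv_equiv track=rewrite | github.com/PhilLint/Master | Knowledge Representation/Satisfiability Solver/Sat.py | count_pos_neg
-- ===== SOURCE A (Python) =====
-- def count_pos_neg(cnf):
--     pos_neg_dict = {}
--
--     for c in cnf:
--         for tuple in c:
--             if tuple[0] not in pos_neg_dict:
--
--                 pos_neg_dict[tuple[0]] = [0,0,0]
--
--                 if tuple[1] == True:
--                     pos_neg_dict[tuple[0]][0] += 1
--                 else:
--                     pos_neg_dict[tuple[0]][1] += 1
--             else:
--                 if tuple[1] == True:
--                     pos_neg_dict[tuple[0]][0] += 1
--                 else: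
--                     pos_neg_dict[tuple[0]][1] += 1
--             pos_neg_dict[tuple[0]][2] = pos_neg_dict[tuple[0]][0] + pos_neg_dict[tuple[0]][1]
--
--     return pos_neg_dict
-- ===== SOURCE B (Python) =====
-- def count_pos_neg(cnf):
--     # pass 1: tabulate positive and negative occurrences into two counters
--     lits = [t for c in cnf for t in c]
--     pos_keys = [v for v, s in lits if s == True]
--     neg_keys = [v for v, s in lits if not (s == True)]
--     pos = {}
--     for v in pos_keys:
--         pos[v] = pos.get(v, 0) + 1
--     neg = {}
--     for v in neg_keys:
--         neg[v] = neg.get(v, 0) + 1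
--     # pass 2: assemble the result over the literals in first-appearance order
--     keys = dict.fromkeys(v for v, s in lits)
--     return {k: [pos.get(k, 0), neg.get(k, 0), pos.get(k, 0) + neg.get(k, 0)]
--             for k in keys}
-- ===== Notes on version B (the rewrite author's own statement) =====
-- stated objective: simpler
-- what changed: Replaces the incremental dict-of-mutable-triples (insert [0,0,0], bump a cell, recompute the sum on every tuple) by a tabulate-then-assemble decomposition: one counting pass into two separate counters, then a second pass over the first-appearance key order building each [pos, neg, pos+neg] triple once.
import Mathlib
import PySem

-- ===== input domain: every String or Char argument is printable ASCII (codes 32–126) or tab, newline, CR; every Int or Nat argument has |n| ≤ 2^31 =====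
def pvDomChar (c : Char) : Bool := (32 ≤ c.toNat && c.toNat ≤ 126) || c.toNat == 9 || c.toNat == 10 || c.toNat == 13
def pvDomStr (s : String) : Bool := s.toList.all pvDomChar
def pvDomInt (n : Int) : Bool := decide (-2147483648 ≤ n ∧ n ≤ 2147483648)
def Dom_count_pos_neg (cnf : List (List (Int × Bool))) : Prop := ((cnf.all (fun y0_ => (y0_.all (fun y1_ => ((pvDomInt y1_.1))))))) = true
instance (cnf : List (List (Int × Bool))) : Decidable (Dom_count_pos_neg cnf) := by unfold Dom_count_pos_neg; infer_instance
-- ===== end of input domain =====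

-- B tabulates positives and negatives into two counters in one pass, then assembles
-- each [pos, neg, pos+neg] triple in a second pass over the first-appearance key order.

-- ===== PORT A =====
-- the two identical if/else bodies of A: bump slot 0 (positive) or slot 1 (negative)
def pvBumpA (v : List Int) (b : Bool) : List Int :=
  if b = true then PySem.List.pySetD v 0 (PySem.List.pyGetD v 0 0 + 1)
  else PySem.List.pySetD v 1 (PySem.List.pyGetD v 1 0 + 1)

-- pos_neg_dict[k][2] = pos_neg_dict[k][0] + pos_neg_dict[k][1]
def pvSumA (v : List Int) : List Int :=
  PySem.List.pySetD v 2 (PySem.List.pyGetD v 0 0 + PySem.List.pyGetD v 1 0)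

-- body of A's inner loop over one tuple
def pvStepA (d : PySem.Dict Int (List Int)) (t : Int × Bool) : PySem.Dict Int (List Int) :=
  let d1 :=
    if d.contains t.1 = false then
      (d.insert t.1 [0, 0, 0]).modify t.1 [] (fun v => pvBumpA v t.2)
    else
      d.modify t.1 [] (fun v => pvBumpA v t.2)
  d1.modify t.1 [] pvSumA

def count_pos_neg (cnf : List (List (Int × Bool))) : List (Int × List Int) :=
  (cnf.foldl (fun d c => c.foldl pvStepA d) PySem.Dict.empty).items

-- ===== PORT B =====
def count_pos_neg_alt (cnf : List (List (Int × Bool))) : List (Int × List Int) :=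
  let lits := cnf.flatMap (fun c => c)
  let posKeys := (lits.filter (fun t => t.2 = true)).map (fun t => t.1)
  let negKeys := (lits.filter (fun t => ¬ (t.2 = true))).map (fun t => t.1)
  let pos := posKeys.foldl (fun d v => d.insert v (d.getD v 0 + 1)) PySem.Dict.empty
  let neg := negKeys.foldl (fun d v => d.insert v (d.getD v 0 + 1)) PySem.Dict.empty
  let keys := PySem.List.dedup (lits.map (fun t => t.1))
  keys.map (fun k => (k, [pos.getD k 0, neg.getD k 0, pos.getD k 0 + neg.getD k 0]))

-- ===== PRECONDITION & SPEC =====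
def Spec_count_pos_neg (cnf : List (List (Int × Bool))) (out : List (Int × List Int)) : Prop := out = count_pos_neg_alt cnf
instance (cnf : List (List (Int × Bool))) (out : List (Int × List Int)) : Decidable (Spec_count_pos_neg cnf out) := by unfold Spec_count_pos_neg; infer_instance

-- ===== CLAIM (what is proved, stated in full; the proofs are below) =====
def Claim_equal_count_pos_neg : Prop := ∀ (cnf : List (List (Int × Bool))), Dom_count_pos_neg cnf → Spec_count_pos_neg cnf (count_pos_neg cnf)

-- ===== LEMMAS AND PROOFS =====

-- the common closed form both ports compute: first-appearance keys, each with its counts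
def pvTgt (lits : List (Int × Bool)) : List (Int × List Int) :=
  (PySem.List.dedup (lits.map (fun t => t.1))).map (fun k =>
    (k, [(lits.count (k, true) : Int), (lits.count (k, false) : Int),
         (lits.count (k, true) : Int) + (lits.count (k, false) : Int)]))

lemma pv_foldl_flat (cnf : List (List (Int × Bool))) (d : PySem.Dict Int (List Int)) :
    cnf.foldl (fun d c => c.foldl pvStepA d) d = (cnf.flatMap (fun c => c)).foldl pvStepA d := by
  induction cnf generalizing d with
  | nil => rfl
  | cons c cs ih => simp [List.flatMap_cons, List.foldl_append, ih]

lemma pv_fresh_val (b : Bool) :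
    pvSumA (pvBumpA [0, 0, 0] b) = if b then [1, 0, 1] else [0, 1, 1] := by
  cases b <;> rfl

lemma pv_step_val (a b' c : Int) (b : Bool) :
    pvSumA (pvBumpA [a, b', c] b) =
      if b then [a + 1, b', a + 1 + b'] else [a, b' + 1, a + (b' + 1)] := by
  cases b <;> rfl

lemma pv_invA (lits : List (Int × Bool)) :
    (lits.foldl pvStepA PySem.Dict.empty).keys = PySem.List.dedup (lits.map (fun t => t.1)) ∧
    ∀ k ∈ lits.map (fun t => t.1),
      (lits.foldl pvStepA PySem.Dict.empty).getD k [] =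
        [(lits.count (k, true) : Int), (lits.count (k, false) : Int),
         (lits.count (k, true) : Int) + (lits.count (k, false) : Int)] := by
  induction lits using List.reverseRecOn with
  | nil => exact ⟨rfl, by simp⟩
  | append_singleton l t ih =>
    obtain ⟨hk, hv⟩ := ih
    rw [List.foldl_append] at *
    simp only [List.foldl_cons, List.foldl_nil]
    set d := l.foldl pvStepA PySem.Dict.empty with hd
    by_cases hmem : t.1 ∈ l.map (fun t => t.1)
    · have hc : d.contains t.1 = true :=
        (PySem.Dict.contains_iff_mem_keys d t.1).mpr
          (hk ▸ (PySem.List.mem_dedup _ _).mpr hmem)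
      have hstep : pvStepA d t =
          (d.modify t.1 [] (fun v => pvBumpA v t.2)).modify t.1 [] pvSumA := by
        simp [pvStepA, hc]
      constructor
      · rw [hstep, PySem.Dict.keys_modify, PySem.Dict.keys_insert_of_contains _ _
            (by simp [PySem.Dict.contains_modify]),
            PySem.Dict.keys_modify, PySem.Dict.keys_insert_of_contains _ _ hc, hk,
            PySem.List.dedup_eq_ofList, PySem.List.dedup_eq_ofList, List.map_append,
            List.map_cons, List.map_nil, PySem.Set.ofList_append_singleton,
            PySem.Set.add_of_mem ((PySem.Set.mem_ofList _ _).mpr hmem)]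
      · intro k hkmem
        rw [hstep]
        simp only [PySem.Dict.getD_modify]
        by_cases hkt : k = t.1
        · obtain ⟨v, b⟩ := t
          simp only at hkt hmem ⊢
          subst hkt
          rw [hv k hmem]
          cases b <;>
            simp [pv_step_val, List.count_append, Prod.ext_iff]
        · have hkl : k ∈ l.map (fun t => t.1) := by
            rcases List.mem_map.mp hkmem with ⟨p, hp, rfl⟩
            rcases List.mem_append.mp hp with h | h
            · exact List.mem_map.mpr ⟨p, h, rfl⟩
            · exact absurd (by simp at h; rw [h]) hkt
          rw [if_neg hkt, if_neg hkt, hv k hkl]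
          have h1 : ∀ b : Bool, (l ++ [t]).count (k, b) = l.count (k, b) := by
            intro b
            have : t ≠ (k, b) := fun h => hkt (by rw [h])
            simp [List.count_append, this]
          rw [h1, h1]
    · have hc : d.contains t.1 = false := by
        rw [← Bool.not_eq_true]
        intro h
        exact hmem ((PySem.List.mem_dedup _ _).mp (hk ▸ (PySem.Dict.contains_iff_mem_keys d t.1).mp h))
      have hstep : pvStepA d t =
          (((d.insert t.1 [0, 0, 0]).modify t.1 [] (fun v => pvBumpA v t.2)).modify t.1 [] pvSumA) := by
        simp [pvStepA, hc]
      constructor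
      · rw [hstep, PySem.Dict.keys_modify, PySem.Dict.keys_insert_of_contains _ _
            (by simp [PySem.Dict.contains_modify, PySem.Dict.contains_insert_self]),
            PySem.Dict.keys_modify, PySem.Dict.keys_insert_of_contains _ _
            (PySem.Dict.contains_insert_self d t.1 _),
            PySem.Dict.keys_insert_of_not_contains _ _ hc, hk,
            PySem.List.dedup_eq_ofList, PySem.List.dedup_eq_ofList, List.map_append,
            List.map_cons, List.map_nil, PySem.Set.ofList_append_singleton,
            PySem.Set.add_of_not_mem (fun h => hmem ((PySem.Set.mem_ofList _ _).mp h))]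
      · intro k hkmem
        rw [hstep]
        simp only [PySem.Dict.getD_modify, PySem.Dict.getD_insert]
        by_cases hkt : k = t.1
        · obtain ⟨v, b⟩ := t
          simp only at hkt hmem ⊢
          subst hkt
          have hcnt0 : ∀ b : Bool, l.count (k, b) = 0 := fun b =>
            List.count_eq_zero.mpr (fun h => hmem (List.mem_map.mpr ⟨(k, b), h, rfl⟩))
          cases b <;>
            simp [pv_fresh_val, List.count_append, hcnt0, Prod.ext_iff]
        · have hkl : k ∈ l.map (fun t => t.1) := by
            rcases List.mem_map.mp hkmem with ⟨p, hp, rfl⟩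
            rcases List.mem_append.mp hp with h | h
            · exact List.mem_map.mpr ⟨p, h, rfl⟩
            · exact absurd (by simp at h; rw [h]) hkt
          rw [if_neg hkt, if_neg hkt, if_neg hkt, hv k hkl]
          have h1 : ∀ b : Bool, (l ++ [t]).count (k, b) = l.count (k, b) := by
            intro b
            have : t ≠ (k, b) := fun h => hkt (by rw [h])
            simp [List.count_append, this]
          rw [h1, h1]

lemma pv_A_eq_tgt (lits : List (Int × Bool)) :
    (lits.foldl pvStepA PySem.Dict.empty).items = pvTgt lits := by
  obtain ⟨hk, hv⟩ := pv_invA lits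
  rw [PySem.Dict.items_eq_map_keys _ (by rw [hk]; exact PySem.List.nodup_dedup _) [], hk]
  unfold pvTgt
  apply List.map_congr_left
  intro k hkmem
  have : k ∈ lits.map (fun t => t.1) := (PySem.List.mem_dedup _ _).mp hkmem
  rw [hv k this]

lemma pv_count_filter (lits : List (Int × Bool)) (k : Int) (b : Bool) :
    ((lits.filter (fun t => t.2 = b)).map (fun t => t.1)).count k = lits.count (k, b) := by
  induction lits with
  | nil => rfl
  | cons t ts ih =>
    obtain ⟨v, s⟩ := t
    by_cases hs : s = b
    · subst hs
      by_cases hv : v = k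
      · subst hv
        simp [ih]
      · simp [ih, hv, Prod.ext_iff]
    · simp [ih, hs]

lemma pv_count_filter_neg (lits : List (Int × Bool)) (k : Int) :
    ((lits.filter (fun t => ¬ (t.2 = true))).map (fun t => t.1)).count k = lits.count (k, false) := by
  have h : (fun t : Int × Bool => decide (¬ (t.2 = true))) = (fun t : Int × Bool => decide (t.2 = false)) := by
    funext t; cases t.2 <;> simp
  rw [show (lits.filter (fun t => ¬ (t.2 = true))) = lits.filter (fun t => t.2 = false) from by rw [show (fun t : Int × Bool => decide (¬ (t.2 = true))) = (fun t : Int × Bool => decide (t.2 = false)) from h]]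
  exact pv_count_filter lits k false

lemma pv_B_eq_tgt (cnf : List (List (Int × Bool))) :
    count_pos_neg_alt cnf = pvTgt (cnf.flatMap (fun c => c)) := by
  unfold count_pos_neg_alt pvTgt
  apply List.map_congr_left
  intro k _
  rw [PySem.Dict.getD_foldl_insert_add_one, PySem.Dict.getD_foldl_insert_add_one,
      PySem.Dict.getD_empty, pv_count_filter, pv_count_filter_neg]
  simp

-- ===== VERDICT (by name: the statement is the Claim_ definition above) =====
theorem count_pos_neg_spec : Claim_equal_count_pos_neg := by
  intro cnf _
  unfold Spec_count_pos_neg count_pos_neg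
  rw [pv_foldl_flat, pv_A_eq_tgt, pv_B_eq_tgt]
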